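-- pv_equiv track=rewrite | github.com/marcocasillas91/my-data-science | Football-ML-v2.0/notebooks/shootingAndStreaks.py | calc_streaks1
-- ===== SOURCE A (Python) =====
-- def result_to_numeric(result):
--     if result.lower() in ["win","w"]:
--         return 1
--     elif result.lower() in ["loss","l"]:
--         return -1
--     elif result.lower() in ["draw","d"]:
--         return 0
--
-- def calc_streaks1(series, streakType):
--     current_streak = 0
--     streaks=[]
--
--     if streakType.lower() in ['unbeaten','u']:
--         numMatchResult = [ result_to_numeric('w'), result_to_numeric('d') ]
--     else:
--         numMatchResult = [ result_to_numeric(streakType.lower()) ]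
--
--     for actualResult in series:
--         if actualResult not in numMatchResult:
--             current_streak =  0
--         else:
--             current_streak += 1
--
--         streaks.append(current_streak)
--
--     return streaks
-- ===== SOURCE B (Python) =====
-- def result_to_numeric(result):
--     if result.lower() in ["win", "w"]:
--         return 1
--     elif result.lower() in ["loss", "l"]:
--         return -1
--     elif result.lower() in ["draw", "d"]:
--         return 0
--
--
-- def calc_streaks1(series, streakType):
--     if streakType.lower() in ['unbeaten', 'u']:
--         targets = [result_to_numeric('w'), result_to_numeric('d')]
--     else:
--         targets = [result_to_numeric(streakType.lower())]
--
--     streaks = []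
--     i = 0
--     n = len(series)
--     while i < n:
--         hit = series[i] in targets
--         j = i + 1
--         while j < n and (series[j] in targets) == hit:
--             j += 1
--         if hit:
--             streaks.extend(range(1, j - i + 1))
--         else:
--             streaks.extend([0] * (j - i))
--         i = j
--     return streaks
-- ===== Notes on version B (the rewrite author's own statement) =====
-- stated objective: alternative
-- what changed: Replaces the per-element running counter with reset by a run-splitting pass: the series is cut into maximal runs of hits/misses and each hit-run is emitted as 1..n, each miss-run as n zeros.
import Mathlib
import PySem

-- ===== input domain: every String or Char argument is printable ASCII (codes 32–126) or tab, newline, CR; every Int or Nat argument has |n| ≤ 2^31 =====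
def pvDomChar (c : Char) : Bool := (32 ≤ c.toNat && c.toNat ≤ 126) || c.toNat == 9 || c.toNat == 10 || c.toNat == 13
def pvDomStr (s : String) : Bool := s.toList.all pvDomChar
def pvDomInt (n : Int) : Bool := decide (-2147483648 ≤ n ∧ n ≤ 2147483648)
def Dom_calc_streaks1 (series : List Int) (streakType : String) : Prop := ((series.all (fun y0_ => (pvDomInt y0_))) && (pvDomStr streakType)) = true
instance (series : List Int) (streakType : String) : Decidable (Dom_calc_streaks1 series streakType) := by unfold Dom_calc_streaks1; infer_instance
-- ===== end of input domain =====

-- B replaces A's running counter-with-reset by a run-splitting pass (maximal hit/miss runs,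
-- emitted as 1..n resp. n zeros); alternative decomposition, same cost.

-- ===== PORT A =====
-- result_to_numeric returns None for unknown strings → Option Int
def result_to_numeric (result : String) : Option Int :=
  if PySem.Str.lower result ∈ ["win", "w"] then some 1
  else if PySem.Str.lower result ∈ ["loss", "l"] then some (-1)
  else if PySem.Str.lower result ∈ ["draw", "d"] then some 0
  else none

def calc_streaks1 (series : List Int) (streakType : String) : List Int :=
  let numMatchResult : List (Option Int) :=
    if PySem.Str.lower streakType ∈ ["unbeaten", "u"] then
      [result_to_numeric "w", result_to_numeric "d"]
    else
      [result_to_numeric (PySem.Str.lower streakType)]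
  (series.foldl
    (fun (s : Int × List Int) actualResult =>
      let c : Int := if some actualResult ∉ numMatchResult then 0 else s.1 + 1
      (c, s.2 ++ [c]))
    ((0 : Int), ([] : List Int))).2

-- ===== PORT B =====
-- run-splitter: inner while-scan of Source B = takeWhile/dropWhile on the same-key predicate
def pyGroupRuns (p : Int → Bool) : List Int → List Int
  | [] => []
  | x :: rest =>
    let run := rest.takeWhile (fun y => p y == p x)
    let out : List Int :=
      if p x then (List.range (run.length + 1)).map (fun i : Nat => (i : Int) + 1)  -- range(1, j-i+1)
      else List.replicate (run.length + 1) 0                                   -- [0]*(j-i)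
    out ++ pyGroupRuns p (rest.dropWhile (fun y => p y == p x))
termination_by xs => xs.length
decreasing_by
  simp only [List.length_cons]
  exact Nat.lt_succ_of_le (List.length_dropWhile_le _ _)

def calc_streaks1_alt (series : List Int) (streakType : String) : List Int :=
  let targets : List (Option Int) :=
    if PySem.Str.lower streakType ∈ ["unbeaten", "u"] then
      [result_to_numeric "w", result_to_numeric "d"]
    else
      [result_to_numeric (PySem.Str.lower streakType)]
  pyGroupRuns (fun x => decide (some x ∈ targets)) series

-- ===== PRECONDITION & SPEC =====
def Spec_calc_streaks1 (series : List Int) (streakType : String) (out : List Int) : Prop := out = calc_streaks1_alt series streakType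
instance (series : List Int) (streakType : String) (out : List Int) : Decidable (Spec_calc_streaks1 series streakType out) := by unfold Spec_calc_streaks1; infer_instance

-- ===== CLAIM (what is proved, stated in full; the proofs are below) =====
def Claim_equal_calc_streaks1 : Prop := ∀ (series : List Int) (streakType : String), Dom_calc_streaks1 series streakType → Spec_calc_streaks1 series streakType (calc_streaks1 series streakType)

-- ===== LEMMAS AND PROOFS =====

-- A's loop, state = current_streak only (the appended list is peeled off by fRun_foldl)
def fRun (p : Int → Bool) : Int → List Int → List Int
  | _, [] => []
  | c, x :: xs =>
    let c' : Int := if p x then c + 1 else 0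
    c' :: fRun p c' xs

theorem fRun_foldl (nm : List (Option Int)) :
    ∀ (xs : List Int) (c : Int) (acc : List Int),
      (xs.foldl
        (fun (s : Int × List Int) a =>
          let c : Int := if some a ∉ nm then 0 else s.1 + 1
          (c, s.2 ++ [c]))
        (c, acc)).2 = acc ++ fRun (fun x => decide (some x ∈ nm)) c xs := by
  intro xs
  induction xs with
  | nil => intro c acc; simp [fRun]
  | cons a xs ih =>
    intro c acc
    rw [List.foldl_cons]
    refine (ih _ _).trans ?_
    by_cases h : some a ∈ nm <;> simp [fRun, h]

theorem fRun_state_eq_zero (p : Int → Bool) (xs : List Int) (c : Int)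
    (h : xs = [] ∨ ∃ y ys, xs = y :: ys ∧ p y = false) :
    fRun p c xs = fRun p 0 xs := by
  rcases h with h | ⟨y, ys, rfl, hy⟩
  · subst h; rfl
  · simp [fRun, hy]

theorem fRun_true_run (p : Int → Bool) :
    ∀ (run : List Int), (∀ y ∈ run, p y = true) → ∀ (c : Int) (rest : List Int),
      fRun p c (run ++ rest) =
        (List.range run.length).map (fun i : Nat => c + (i : Int) + 1) ++
          fRun p (c + run.length) rest := by
  intro run
  induction run with
  | nil => intro _ c rest; simp
  | cons y run ih =>
    intro h c rest
    have hy : p y = true := h y (by simp)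
    have hrest : ∀ z ∈ run, p z = true := fun z hz => h z (by simp [hz])
    simp only [List.cons_append, fRun, hy, if_pos, List.length_cons]
    rw [ih hrest (c + 1) rest, List.range_succ_eq_map]
    simp only [List.map_cons, List.map_map, List.cons_append]
    congr 1
    · push_cast; ring
    congr 1
    · apply List.map_congr_left
      intro i _
      simp only [Function.comp_apply]
      push_cast; ring
    · congr 1
      push_cast; ring

theorem fRun_false_run (p : Int → Bool) :
    ∀ (run : List Int), (∀ y ∈ run, p y = false) → ∀ (rest : List Int),
      fRun p 0 (run ++ rest) = List.replicate run.length 0 ++ fRun p 0 rest := by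
  intro run
  induction run with
  | nil => intro _ rest; simp
  | cons y run ih =>
    intro h rest
    have hy : p y = false := h y (by simp)
    have hrest : ∀ z ∈ run, p z = false := fun z hz => h z (by simp [hz])
    simp only [List.cons_append, fRun, hy, Bool.false_eq_true, if_false, List.length_cons]
    rw [ih hrest rest, List.replicate_succ, List.cons_append]

theorem fRun_eq_pyGroupRuns (p : Int → Bool) : ∀ xs, fRun p 0 xs = pyGroupRuns p xs := by
  intro xs
  induction xs using pyGroupRuns.induct p with
  | case1 => simp [fRun, pyGroupRuns]
  | case2 x rest ih =>
    have hsplit : rest.takeWhile (fun y => p y == p x) ++ rest.dropWhile (fun y => p y == p x) = rest :=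
      List.takeWhile_append_dropWhile
    have hrunkey : ∀ y ∈ rest.takeWhile (fun y => p y == p x), p y = p x := by
      intro y hy
      have := List.mem_takeWhile_imp hy
      exact beq_iff_eq.mp this
    have hdrop : rest.dropWhile (fun y => p y == p x) = [] ∨
        ∃ y ys, rest.dropWhile (fun y => p y == p x) = y :: ys ∧ p y = false ∨
          (rest.dropWhile (fun y => p y == p x) = y :: ys ∧ p y ≠ p x) := by
      cases hd : rest.dropWhile (fun y => p y == p x) with
      | nil => exact Or.inl rfl
      | cons y ys =>
        refine Or.inr ⟨y, ys, Or.inr ⟨rfl, ?_⟩⟩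
        have := List.head?_dropWhile_not (fun y => p y == p x) rest
        rw [hd] at this
        simp at this
        exact this
    rw [pyGroupRuns]
    by_cases hx : p x = true
    · -- hit-run
      have hrun : ∀ y ∈ rest.takeWhile (fun y => p y == p x), p y = true := by
        intro y hy; rw [hrunkey y hy, hx]
      have h1 : fRun p 0 (x :: rest) = 1 :: fRun p 1 rest := by
        simp [fRun, hx]
      rw [h1, ← hsplit, fRun_true_run p _ hrun 1 _]
      have hstate : fRun p (1 + ((rest.takeWhile (fun y => p y == p x)).length : Int))
          (rest.dropWhile (fun y => p y == p x)) = fRun p 0 (rest.dropWhile (fun y => p y == p x)) := by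
        apply fRun_state_eq_zero
        rcases hdrop with hnil | ⟨y, ys, hc | hc⟩
        · exact Or.inl hnil
        · exact Or.inr ⟨y, ys, hc⟩
        · refine Or.inr ⟨y, ys, hc.1, ?_⟩
          cases hpy : p y with
          | false => rfl
          | true => exact absurd (hpy.trans hx.symm) hc.2
      rw [hstate, hsplit, ih, hx, if_pos rfl, List.range_succ_eq_map]
      simp only [List.map_cons, List.map_map, List.cons_append]
      congr 1
      congr 1
      apply List.map_congr_left
      intro i _
      simp only [Function.comp_apply]
      omega
    · -- miss-run
      have hx' : p x = false := by cases h : p x with | false => rfl | true => exact absurd h hx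
      have hrun : ∀ y ∈ rest.takeWhile (fun y => p y == p x), p y = false := by
        intro y hy; rw [hrunkey y hy, hx']
      have h1 : fRun p 0 (x :: rest) = 0 :: fRun p 0 rest := by
        simp [fRun, hx']
      rw [h1, ← hsplit, fRun_false_run p _ hrun _, hsplit, ih, hx']
      simp [List.replicate_succ]

-- ===== VERDICT (by name: the statement is the Claim_ definition above) =====
theorem calc_streaks1_spec : Claim_equal_calc_streaks1 := by
  intro series streakType _
  unfold Spec_calc_streaks1 calc_streaks1 calc_streaks1_alt
  simp only []
  rw [fRun_foldl, List.nil_append, fRun_eq_pyGroupRuns]
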